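-- pv_equiv track=rewrite | github.com/boun-tabi-lifelu/puffin | src/cluster_structural_compare.py | _segments_from_labels
-- ===== SOURCE A (Python) =====
-- from typing import Any, Dict, List, Optional, Tuple
--
-- def _segments_from_labels(
--     residue_nums: List[int],
--     labels: List[int],
--     pad_label: int = -1,
-- ) -> Dict[int, List[int]]:
--     """
--     Returns {label: [residue_num,...]} excluding pad_label.
--     """
--     segs: Dict[int, List[int]] = {}
--     for rn, lab in zip(residue_nums, labels):
--         if lab == pad_label:
--             continue
--         segs.setdefault(int(lab), []).append(int(rn))
--     return segs
-- ===== SOURCE B (Python) =====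
-- def _segments_from_labels(residue_nums, labels, pad_label=-1):
--     # Two-phase: collect non-pad (label, residue) pairs once, then build the
--     # dict by first-occurrence key order with one filtering pass per key.
--     pairs = [(int(lab), int(rn)) for rn, lab in zip(residue_nums, labels)
--              if lab != pad_label]
--     keys = list(dict.fromkeys(lab for lab, _ in pairs))
--     return {k: [rn for lab, rn in pairs if lab == k] for k in keys}
-- ===== Notes on version B (the rewrite author's own statement) =====
-- stated objective: alternative
-- what changed: Replaces the single-pass setdefault/append dict mutation by a two-phase decomposition: filter the zipped pairs once, dedupe the labels in first-occurrence order, then build each group with a per-key filtering comprehension.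
import Mathlib
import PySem

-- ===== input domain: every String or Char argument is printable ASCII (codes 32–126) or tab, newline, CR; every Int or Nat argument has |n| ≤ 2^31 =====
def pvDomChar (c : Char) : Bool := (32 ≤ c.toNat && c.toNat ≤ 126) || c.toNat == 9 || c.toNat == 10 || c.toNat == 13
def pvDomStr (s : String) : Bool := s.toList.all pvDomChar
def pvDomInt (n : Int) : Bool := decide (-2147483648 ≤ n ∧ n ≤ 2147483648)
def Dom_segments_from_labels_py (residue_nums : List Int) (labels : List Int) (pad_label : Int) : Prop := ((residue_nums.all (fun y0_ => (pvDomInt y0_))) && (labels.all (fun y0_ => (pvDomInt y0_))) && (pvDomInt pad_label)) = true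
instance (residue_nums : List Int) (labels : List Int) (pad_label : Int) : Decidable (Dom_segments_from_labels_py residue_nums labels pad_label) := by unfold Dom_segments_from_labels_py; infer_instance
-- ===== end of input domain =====

-- B replaces A's single-pass setdefault/append dict mutation by a two-phase
-- decomposition (filter pairs once, dedupe labels, one filtering pass per key);
-- alternative structure, same results.


-- ===== PORT A =====
-- segs.setdefault(int(lab), []).append(int(rn)) on a dict with int keys:
-- exact as 'append rn to the first entry with key lab, or add (lab,[rn]) at the
-- end' on the insertion-order association list.
def pvSetdefaultAppend (segs : List (Int × List Int)) (lab rn : Int) : List (Int × List Int) :=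
  match segs with
  | [] => [(lab, [rn])]
  | (k, vs) :: rest =>
      if k = lab then (k, vs ++ [rn]) :: rest
      else (k, vs) :: pvSetdefaultAppend rest lab rn

def segments_from_labels_py (residue_nums : List Int) (labels : List Int) (pad_label : Int) : List (Int × List Int) :=
  (List.zip residue_nums labels).foldl
    (fun segs p => if p.2 = pad_label then segs else pvSetdefaultAppend segs p.2 p.1) []

-- ===== PORT B =====
-- pairs = [(int(lab), int(rn)) for rn, lab in zip(...) if lab != pad_label]
def pvPairsB (residue_nums : List Int) (labels : List Int) (pad_label : Int) : List (Int × Int) :=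
  (List.zip residue_nums labels).filterMap
    (fun p => if p.2 = pad_label then none else some (p.2, p.1))

-- list(dict.fromkeys(...)): first-occurrence dedup of the labels.
def pvFromKeys (ls : List Int) : List Int :=
  ls.foldl (fun acc l => if l ∈ acc then acc else acc ++ [l]) []

def segments_from_labels_py_alt (residue_nums : List Int) (labels : List Int) (pad_label : Int) : List (Int × List Int) :=
  let pairs := pvPairsB residue_nums labels pad_label
  let keys := pvFromKeys (pairs.map Prod.fst)
  keys.map (fun k => (k, pairs.filterMap (fun p => if p.1 = k then some p.2 else none)))

-- ===== PRECONDITION & SPEC =====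
def Spec_segments_from_labels_py (residue_nums : List Int) (labels : List Int) (pad_label : Int) (out : List (Int × List Int)) : Prop := out = segments_from_labels_py_alt residue_nums labels pad_label
instance (residue_nums : List Int) (labels : List Int) (pad_label : Int) (out : List (Int × List Int)) : Decidable (Spec_segments_from_labels_py residue_nums labels pad_label out) := by unfold Spec_segments_from_labels_py; infer_instance

-- ===== CLAIM (what is proved, stated in full; the proofs are below) =====
def Claim_equal_segments_from_labels_py : Prop := ∀ (residue_nums : List Int) (labels : List Int) (pad_label : Int), Dom_segments_from_labels_py residue_nums labels pad_label → Spec_segments_from_labels_py residue_nums labels pad_label (segments_from_labels_py residue_nums labels pad_label)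

-- ===== LEMMAS AND PROOFS =====

-- residues of ps grouped under key k
def pvVals (ps : List (Int × Int)) (k : Int) : List Int :=
  ps.filterMap (fun p => if p.1 = k then some p.2 else none)

-- A's fold, rephrased over the filtered pair list
def pvBuild (ps : List (Int × Int)) : List (Int × List Int) :=
  ps.foldl (fun segs p => pvSetdefaultAppend segs p.1 p.2) []

theorem pvFromKeys_core_mem (ls : List Int) (acc : List Int) (y : Int) :
    y ∈ ls.foldl (fun acc l => if l ∈ acc then acc else acc ++ [l]) acc ↔ y ∈ acc ∨ y ∈ ls := by
  induction ls generalizing acc with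
  | nil => simp
  | cons a ls ih =>
      simp only [List.foldl_cons, ih]
      by_cases h : a ∈ acc
      · simp only [if_pos h, List.mem_cons]
        constructor
        · tauto
        · rintro (hy | hy | hy)
          · tauto
          · subst hy; tauto
          · tauto
      · rw [if_neg h]
        simp only [List.mem_append, List.mem_cons]
        tauto
  
theorem pvFromKeys_mem (ls : List Int) (y : Int) : y ∈ pvFromKeys ls ↔ y ∈ ls := by
  simpa using pvFromKeys_core_mem ls [] y

theorem pvFromKeys_core_nodup (ls : List Int) (acc : List Int) (h : acc.Nodup) :
    (ls.foldl (fun acc l => if l ∈ acc then acc else acc ++ [l]) acc).Nodup := by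
  induction ls generalizing acc with
  | nil => simpa
  | cons a ls ih =>
      simp only [List.foldl_cons]
      by_cases ha : a ∈ acc
      · simpa [ha] using ih acc h
      · rw [if_neg ha]
        refine ih _ ?_
        simp [List.nodup_append, h]
        exact fun x hx e => ha (e ▸ hx)

theorem pvFromKeys_nodup (ls : List Int) : (pvFromKeys ls).Nodup :=
  pvFromKeys_core_nodup ls [] List.nodup_nil

theorem pvFromKeys_append_one (ls : List Int) (x : Int) :
    pvFromKeys (ls ++ [x]) =
      if x ∈ pvFromKeys ls then pvFromKeys ls else pvFromKeys ls ++ [x] := by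
  simp [pvFromKeys, List.foldl_append]

theorem pvVals_append_one (ps : List (Int × Int)) (p : Int × Int) (k : Int) :
    pvVals (ps ++ [p]) k = pvVals ps k ++ (if p.1 = k then [p.2] else []) := by
  simp only [pvVals, List.filterMap_append]
  by_cases h : p.1 = k <;> simp [h]

theorem pvVals_nil_of_not_mem (ps : List (Int × Int)) (k : Int) (h : k ∉ ps.map Prod.fst) :
    pvVals ps k = [] := by
  induction ps with
  | nil => rfl
  | cons p ps ih =>
      simp only [List.map_cons, List.mem_cons, not_or] at h
      simp [pvVals, Ne.symm h.1]
      simpa [pvVals] using ih h.2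

theorem pvSetdefaultAppend_not_mem (segs : List (Int × List Int)) (lab rn : Int)
    (h : lab ∉ segs.map Prod.fst) :
    pvSetdefaultAppend segs lab rn = segs ++ [(lab, [rn])] := by
  induction segs with
  | nil => rfl
  | cons q segs ih =>
      obtain ⟨k, vs⟩ := q
      simp only [List.map_cons, List.mem_cons, not_or] at h
      simp [pvSetdefaultAppend, Ne.symm h.1, ih h.2]

theorem pvSetdefaultAppend_map (D : List Int) (g : Int → List Int) (k v : Int)
    (hD : D.Nodup) (hk : k ∈ D) :
    pvSetdefaultAppend (D.map (fun x => (x, g x))) k v =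
      D.map (fun x => (x, g x ++ if x = k then [v] else [])) := by
  induction D with
  | nil => cases hk
  | cons d D ih =>
      rcases List.nodup_cons.mp hD with ⟨hd, hD'⟩
      by_cases h : d = k
      · subst h
        have hmap : ∀ x ∈ D, (fun x => (x, g x ++ if x = d then [v] else [])) x
            = (fun x => (x, g x)) x := by
          intro x hx
          have hxd : x ≠ d := fun e => hd (e ▸ hx)
          simp [hxd]
        simp only [List.map_cons, List.map_congr_left hmap]
        simp [pvSetdefaultAppend]
      · have hk' : k ∈ D := by
          rcases List.mem_cons.mp hk with h1 | h1
          · exact absurd h1.symm h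
          · exact h1
        simp only [List.map_cons, pvSetdefaultAppend, ih hD' hk']
        simp [h]

theorem pvBuild_eq (ps : List (Int × Int)) :
    pvBuild ps = (pvFromKeys (ps.map Prod.fst)).map (fun k => (k, pvVals ps k)) := by
  induction ps using List.reverseRecOn with
  | nil => rfl
  | append_singleton ps p ih =>
      have hbuild : pvBuild (ps ++ [p]) = pvSetdefaultAppend (pvBuild ps) p.1 p.2 := by
        simp [pvBuild, List.foldl_append]
      have hmap1 : (ps ++ [p]).map Prod.fst = ps.map Prod.fst ++ [p.1] := by simp
      rw [hbuild, ih, hmap1, pvFromKeys_append_one]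
      by_cases hmem : p.1 ∈ pvFromKeys (ps.map Prod.fst)
      · rw [if_pos hmem,
          pvSetdefaultAppend_map _ _ _ _ (pvFromKeys_nodup _) hmem]
        refine List.map_congr_left ?_
        intro x _
        rw [pvVals_append_one]
        by_cases h : p.1 = x
        · simp [h]
        · have h2 : ¬ x = p.1 := fun e => h e.symm
          simp [h, h2]
      · rw [if_neg hmem]
        have hkeys : p.1 ∉ ((pvFromKeys (ps.map Prod.fst)).map
            (fun k => (k, pvVals ps k))).map Prod.fst := by
          simpa using hmem
        rw [pvSetdefaultAppend_not_mem _ _ _ hkeys, List.map_append]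
        congr 1
        · refine List.map_congr_left ?_
          intro x hx
          have hxp : ¬ (p.1 = x) := fun e => hmem (e ▸ hx)
          simp [pvVals_append_one, hxp]
        · have hnm : p.1 ∉ ps.map Prod.fst := fun h => hmem ((pvFromKeys_mem _ _).mpr h)
          simp [pvVals_append_one, pvVals_nil_of_not_mem ps p.1 hnm]

theorem pvA_eq_build (zl : List (Int × Int)) (pad : Int) (segs : List (Int × List Int)) :
    zl.foldl (fun segs p => if p.2 = pad then segs else pvSetdefaultAppend segs p.2 p.1) segs
      = (zl.filterMap (fun p => if p.2 = pad then none else some (p.2, p.1))).foldl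
          (fun segs p => pvSetdefaultAppend segs p.1 p.2) segs := by
  induction zl generalizing segs with
  | nil => rfl
  | cons q zl ih =>
      by_cases h : q.2 = pad <;> simp [h, ih]

-- ===== VERDICT (by name: the statement is the Claim_ definition above) =====
theorem segments_from_labels_py_spec : Claim_equal_segments_from_labels_py := by
  intro residue_nums labels pad_label _
  show segments_from_labels_py residue_nums labels pad_label
      = segments_from_labels_py_alt residue_nums labels pad_label
  unfold segments_from_labels_py segments_from_labels_py_alt
  rw [pvA_eq_build]
  exact pvBuild_eq (pvPairsB residue_nums labels pad_label)
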